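-- pv_equiv track=rewrite | github.com/RT-Thread/IoT_Board | examples/31_micropython/packages/adbd-v1.1.0/tools/script/adb_sync.py | list_merge_path
-- ===== SOURCE A (Python) =====
-- def list_merge_path(list):
--     i = 0
--     j = 0
--     sort_res = sorted(list,key = lambda i:len(i),reverse=False)
--     while i < len(sort_res):
--         j = i + 1
--         while j < len(sort_res):
--             t1 = sort_res[i]
--             t2 = sort_res[j]
--             if t2.count(t1, 0, len(t1)) > 0:
--                 sort_res.pop(j)
--             else:
--                 j += 1
--         i += 1
--     return sort_res
-- ===== SOURCE B (Python) =====
-- def list_merge_path(list):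
--     # Length-sorted scan with a hash set of kept strings: a candidate is dropped
--     # iff one of its own prefixes is already in the set, so the inner scan over
--     # previously kept strings disappears.
--     kept = set()
--     res = []
--     for s in sorted(list, key=len):
--         if not any(s[:k] in kept for k in range(len(s) + 1)):
--             res.append(s)
--             kept.add(s)
--     return res
-- ===== Notes on version B (the rewrite author's own statement) =====
-- stated objective: faster
-- what changed: Replaces the quadratic in-place pop loop (each kept string rescanned against all later strings) by a single length-sorted pass that keeps a hash set of kept strings and drops a candidate iff one of its own prefixes is in the set.
import Mathlib
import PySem

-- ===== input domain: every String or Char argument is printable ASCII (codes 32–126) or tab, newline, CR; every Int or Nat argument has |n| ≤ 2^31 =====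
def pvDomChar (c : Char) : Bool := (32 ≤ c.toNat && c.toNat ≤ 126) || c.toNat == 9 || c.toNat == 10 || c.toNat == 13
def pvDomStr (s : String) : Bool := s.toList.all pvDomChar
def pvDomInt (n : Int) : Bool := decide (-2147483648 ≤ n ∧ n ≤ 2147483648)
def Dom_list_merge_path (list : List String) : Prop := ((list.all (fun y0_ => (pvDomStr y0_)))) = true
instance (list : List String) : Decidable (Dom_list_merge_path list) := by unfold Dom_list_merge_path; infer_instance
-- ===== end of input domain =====

-- B replaces A's quadratic pop-loop by one length-sorted pass with a hash set of kept
-- strings, dropping a candidate iff one of its own prefixes is in the set (objective: faster).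

-- ===== PORT A =====
-- t2.count(t1, 0, len(t1)) > 0 : count of t1 inside the slice t2[0:len(t1)] (Python's
-- str.count with bounds counts occurrences inside the slice; exact).
def pvTestA (t1 t2 : String) : Bool :=
  decide (0 < PySem.Str.count (PySem.Str.slice t2 (some 0) (some (PySem.Str.len t1))) t1)

-- inner 'while j < len(sort_res)', transcribed as structural recursion on the loop
-- measure len(sort_res) - j (it strictly drops each iteration: pop shrinks the list,
-- else j grows); sort_res.pop(j) discards the popped element, so it is ported as
-- List.eraseIdx j (exact by PySem.List.pop?_natCast since j is in range); the in-range
-- reads sort_res[i], sort_res[j] are ported with the total form PySem.List.pyGetD.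
def pvInnerA : Nat → List String → Nat → Nat → List String
  | 0, l, _, _ => l
  | n + 1, l, i, j =>
    if j < l.length then
      if pvTestA (PySem.List.pyGetD l (i : Int) "") (PySem.List.pyGetD l (j : Int) "") then
        pvInnerA n (l.eraseIdx j) i j
      else pvInnerA n l i (j + 1)
    else l

-- outer 'while i < len(sort_res)', measure len(sort_res) - i
def pvOuterA : Nat → List String → Nat → List String
  | 0, l, _ => l
  | n + 1, l, i =>
    if i < l.length then pvOuterA n (pvInnerA (l.length - (i + 1)) l i (i + 1)) (i + 1) else l

def list_merge_path (list : List String) : List String :=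
  let sort_res := PySem.List.sorted list (fun s => PySem.Str.len s) false
  pvOuterA sort_res.length sort_res 0

-- ===== PORT B =====
-- any(s[:k] in kept for k in range(len(s) + 1))
def pvBlockedB (kept : PySem.Set String) (s : String) : Bool :=
  (PySem.List.pyRange 0 (PySem.Str.len s + 1) 1).any
    (fun k => kept.contains (PySem.Str.slice s none (some k)))

-- 'for s in sorted(list, key=len): if not blocked: res.append(s); kept.add(s)'
def pvGoB (l : List String) (kept : PySem.Set String) : List String :=
  match l with
  | [] => []
  | h :: t => if pvBlockedB kept h then pvGoB t kept else h :: pvGoB t (kept.add h)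

def list_merge_path_alt (list : List String) : List String :=
  pvGoB (PySem.List.sorted list (fun s => PySem.Str.len s) false) PySem.Set.empty

-- ===== PRECONDITION & SPEC =====
def Spec_list_merge_path (list : List String) (out : List String) : Prop := out = list_merge_path_alt list
instance (list : List String) (out : List String) : Decidable (Spec_list_merge_path list out) := by unfold Spec_list_merge_path; infer_instance

-- ===== CLAIM (what is proved, stated in full; the proofs are below) =====
def Claim_equal_list_merge_path : Prop := ∀ (list : List String), Dom_list_merge_path list → Spec_list_merge_path list (list_merge_path list)

-- ===== LEMMAS AND PROOFS =====

-- the common mathematical core: keep the head, discard later strings it is a prefix of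
def pvSpecCore (l : List String) : List String :=
  match l with
  | [] => []
  | h :: t => h :: pvSpecCore (t.filter (fun s => !pvTestA h s))
termination_by l.length
decreasing_by
  simp only [List.length_cons, List.length_unattach]
  exact Nat.lt_succ_of_le (le_trans (List.length_filter_le _ _) (by simp))

theorem pvSpecCore_nil : pvSpecCore [] = [] := by rw [pvSpecCore.eq_def]

theorem pvSpecCore_cons (h : String) (t : List String) :
    pvSpecCore (h :: t) = h :: pvSpecCore (t.filter (fun s => !pvTestA h s)) := by
  rw [pvSpecCore.eq_def]

-- unfolding equations of the PySem substring counter (hold definitionally)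
theorem pvGo_zero (sub l : List Char) (acc : Nat) : PySem.Chars.count.go sub 0 l acc = acc := rfl
theorem pvGo_nil (sub : List Char) (n acc : Nat) : PySem.Chars.count.go sub (n + 1) [] acc = acc := rfl
theorem pvGo_cons (sub : List Char) (c : Char) (t : List Char) (n acc : Nat) :
    PySem.Chars.count.go sub (n + 1) (c :: t) acc =
      if sub.isPrefixOf (c :: t) then
        PySem.Chars.count.go sub n (List.drop sub.length (c :: t)) (acc + 1)
      else PySem.Chars.count.go sub n t acc := rfl

theorem pvGo_ge (sub : List Char) (fuel : Nat) (l : List Char) (acc : Nat) :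
    acc ≤ PySem.Chars.count.go sub fuel l acc := by
  induction fuel generalizing l acc with
  | zero => rw [pvGo_zero]
  | succ n ih =>
    cases l with
    | nil => rw [pvGo_nil]
    | cons c t =>
      rw [pvGo_cons]
      split
      · exact le_trans (Nat.le_succ acc) (ih _ _)
      · exact ih _ _

theorem pvGo_short (sub : List Char) (fuel : Nat) (l : List Char) (acc : Nat)
    (h : l.length < sub.length) : PySem.Chars.count.go sub fuel l acc = acc := by
  induction fuel generalizing l acc with
  | zero => rw [pvGo_zero]
  | succ n ih =>
    cases l with
    | nil => rw [pvGo_nil]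
    | cons c t =>
      rw [pvGo_cons]
      have hp : sub.isPrefixOf (c :: t) = false := by
        rcases hx : sub.isPrefixOf (c :: t) with _ | _
        · rfl
        · have := (List.isPrefixOf_iff_prefix.mp hx).length_le
          omega
      rw [hp]
      simp only [Bool.false_eq_true, if_false]
      exact ih t acc (by simp at h ⊢; omega)

-- A's test is exactly "t1 is a prefix of t2"
theorem pvCount_take_pos_iff (a b : List Char) :
    (0 < PySem.Chars.count (b.take a.length) a) ↔ a <+: b := by
  unfold PySem.Chars.count
  by_cases ha : a = []
  · subst ha; simp
  · have hne : a.isEmpty = false := by simpa [List.isEmpty_iff] using ha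
    rw [hne]
    simp only [Bool.false_eq_true, if_false]
    constructor
    · intro hpos
      by_contra hnp
      have hlen : (b.take a.length).length ≤ a.length := by simp [List.length_take]
      rcases Nat.lt_or_ge (b.take a.length).length a.length with hlt | hge
      · rw [pvGo_short a _ _ 0 hlt] at hpos; omega
      · have heq : (b.take a.length).length = a.length := le_antisymm hlen hge
        have hne2 : b.take a.length ≠ a := fun hx => hnp (List.prefix_iff_eq_take.mpr hx.symm)
        obtain ⟨d, t, hcs⟩ : ∃ d t, b.take a.length = d :: t := by
          cases hcs : b.take a.length with
          | nil => rw [hcs] at heq; simp at heq; exact absurd (List.eq_nil_of_length_eq_zero heq.symm) ha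
          | cons d t => exact ⟨d, t, rfl⟩
        rw [hcs] at hpos heq hne2
        simp only [List.length_cons] at hpos
        rw [pvGo_cons] at hpos
        have hp : a.isPrefixOf (d :: t) = false := by
          rcases hx : a.isPrefixOf (d :: t) with _ | _
          · rfl
          · have hpre := List.isPrefixOf_iff_prefix.mp hx
            have := hpre.eq_of_length (by simp at heq ⊢; omega)
            exact absurd this.symm hne2
        rw [hp] at hpos
        simp only [Bool.false_eq_true, if_false] at hpos
        rw [pvGo_short a _ t 0 (by simp at heq ⊢; omega)] at hpos
        omega
    · intro hpre
      have htake : b.take a.length = a := (List.prefix_iff_eq_take.mp hpre).symm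
      rw [htake]
      obtain ⟨c, t, rfl⟩ := List.exists_cons_of_ne_nil ha
      simp only [List.length_cons]
      rw [pvGo_cons]
      have hp : (c :: t).isPrefixOf (c :: t) = true :=
        List.isPrefixOf_iff_prefix.mpr List.prefix_rfl
      rw [hp]
      simp only [if_true]
      rw [List.drop_length]
      exact lt_of_lt_of_le Nat.zero_lt_one (pvGo_ge _ _ _ _)

theorem pvTestA_iff (a b : String) : pvTestA a b = true ↔ a.toList <+: b.toList := by
  unfold pvTestA
  rw [decide_eq_true_iff, PySem.Str.count_eq, PySem.Str.toList_slice,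
    PySem.Chars.slice_eq_listSlice]
  have hlen : PySem.Str.len a = (a.toList.length : Int) := by simp [PySem.Str.len_eq]
  rw [hlen, PySem.List.slice_zero_start, PySem.List.slice_to_natCast]
  exact pvCount_take_pos_iff a.toList b.toList

-- inner loop: filters the part beyond j by "l[i] is not a prefix"
theorem pvInnerA_spec (n : Nat) (l : List String) (i j : Nat)
    (hn : l.length - j ≤ n) (hij : i < j) :
    pvInnerA n l i j =
      l.take j ++ (l.drop j).filter (fun s => !pvTestA (PySem.List.pyGetD l (i : Int) "") s) := by
  induction n generalizing l j with
  | zero =>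
    have hle : l.length ≤ j := by omega
    simp [pvInnerA, List.take_of_length_le hle, List.drop_of_length_le hle]
  | succ n ih =>
    rw [pvInnerA]
    by_cases h : j < l.length
    · simp only [h, if_true]
      have hdj : l.drop j = l[j] :: l.drop (j + 1) := List.drop_eq_getElem_cons h
      have ht2 : PySem.List.pyGetD l (j : Int) "" = l[j] := by
        rw [PySem.List.pyGetD_natCast, List.getD_eq_getElem?_getD, List.getElem?_eq_getElem h]
        rfl
      rw [ht2]
      cases ht : pvTestA (PySem.List.pyGetD l (i : Int) "") l[j] with
      | true =>
        simp only [if_true]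
        have hlen : (l.eraseIdx j).length = l.length - 1 := List.length_eraseIdx_of_lt h
        have ih' := ih (l.eraseIdx j) j (by omega) hij
        have hgi : PySem.List.pyGetD (l.eraseIdx j) (i : Int) "" = PySem.List.pyGetD l (i : Int) "" := by
          rw [PySem.List.pyGetD_natCast, PySem.List.pyGetD_natCast, List.getD_eq_getElem?_getD,
            List.getD_eq_getElem?_getD, List.getElem?_eraseIdx_of_lt hij]
        have htake : (l.eraseIdx j).take j = l.take j := by
          rw [List.eraseIdx_eq_take_drop_succ, List.take_append]
          simp [List.length_take, Nat.le_of_lt h]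
        have hdrop : (l.eraseIdx j).drop j = l.drop (j + 1) := by
          rw [List.eraseIdx_eq_take_drop_succ, List.drop_append]
          simp [List.length_take, Nat.min_eq_left (Nat.le_of_lt h)]
        rw [ih', hgi, htake, hdrop, hdj, List.filter_cons]
        simp only [ht, Bool.not_true, Bool.false_eq_true, if_false]
      | false =>
        simp only [Bool.false_eq_true, if_false]
        have ih' := ih l (j + 1) (by omega) (lt_trans hij (Nat.lt_succ_self j))
        have htj : l.take (j + 1) = l.take j ++ [l[j]] := by
          rw [List.take_add_one, List.getElem?_eq_getElem h]
          rfl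
        rw [ih', hdj, List.filter_cons]
        simp only [ht, Bool.not_false, if_true]
        rw [htj, List.append_assoc, List.singleton_append]
    · simp only [h, if_false]
      have hle : l.length ≤ j := Nat.le_of_not_lt h
      simp [List.take_of_length_le hle, List.drop_of_length_le hle]

-- outer loop: the already-fixed prefix ++ the recursive core on the rest
theorem pvOuterA_spec (n : Nat) (l : List String) (i : Nat) (hn : l.length - i ≤ n) :
    pvOuterA n l i = l.take i ++ pvSpecCore (l.drop i) := by
  induction n generalizing l i with
  | zero =>
    have hle : l.length ≤ i := by omega
    simp [pvOuterA, List.take_of_length_le hle, List.drop_of_length_le hle, pvSpecCore_nil]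
  | succ n ih =>
    rw [pvOuterA]
    by_cases h : i < l.length
    · simp only [h, if_true]
      rw [pvInnerA_spec (l.length - (i + 1)) l i (i + 1) (le_refl _) (Nat.lt_succ_self i)]
      set p := fun s => !pvTestA (PySem.List.pyGetD l (i : Int) "") s with hp
      set l' := l.take (i + 1) ++ (l.drop (i + 1)).filter p with hl'
      have hlen : (l.take (i + 1)).length = i + 1 := by
        simp [List.length_take, Nat.min_eq_left (Nat.succ_le_of_lt h)]
      have hflt := List.length_filter_le p (l.drop (i + 1))
      have hlen' : l'.length ≤ l.length := by
        rw [hl', List.length_append, hlen]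
        have := List.length_drop (l := l) (i := i + 1)
        omega
      have htk : l'.take (i + 1) = l.take (i + 1) := by
        rw [hl', List.take_append, hlen]
        simp
      have hdr : l'.drop (i + 1) = (l.drop (i + 1)).filter p := by
        rw [hl', List.drop_append, hlen]
        simp
      rw [ih l' (i + 1) (by omega), htk, hdr]
      have hdi : l.drop i = l[i] :: l.drop (i + 1) := List.drop_eq_getElem_cons h
      have hti : l.take (i + 1) = l.take i ++ [l[i]] := by
        rw [List.take_add_one, List.getElem?_eq_getElem h]
        rfl
      have hgi : PySem.List.pyGetD l (i : Int) "" = l[i] := by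
        rw [PySem.List.pyGetD_natCast, List.getD_eq_getElem?_getD, List.getElem?_eq_getElem h]
        rfl
      rw [hdi, pvSpecCore_cons]
      simp only [hp, hgi]
      rw [hti, List.append_assoc, List.singleton_append]
    · simp only [h, if_false]
      have hle : l.length ≤ i := Nat.le_of_not_lt h
      simp [List.take_of_length_le hle, List.drop_of_length_le hle, pvSpecCore_nil]

-- B's blocked test: some kept string is a prefix of s
theorem pvBlockedB_iff (kept : PySem.Set String) (s : String) :
    pvBlockedB kept s = true ↔ ∃ a ∈ kept, a.toList <+: s.toList := by
  unfold pvBlockedB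
  rw [List.any_eq_true]
  constructor
  · rintro ⟨k, hk, hc⟩
    rw [PySem.Set.contains_iff] at hc
    refine ⟨_, hc, ?_⟩
    rw [PySem.Str.toList_slice, PySem.Chars.slice_eq_listSlice]
    have hk' := (PySem.List.mem_pyRange_iff_of_pos (by norm_num) k).mp hk
    rw [PySem.List.slice_to _ hk'.1]
    exact List.take_prefix _ _
  · rintro ⟨a, ha, hpre⟩
    refine ⟨(a.toList.length : Int), ?_, ?_⟩
    · rw [PySem.List.mem_pyRange_iff_of_pos (by norm_num)]
      refine ⟨Int.natCast_nonneg _, ?_, by simp⟩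
      have h1 := hpre.length_le
      have h2 : PySem.Str.len s = (s.toList.length : Int) := by simp [PySem.Str.len_eq]
      omega
    · rw [PySem.Set.contains_iff]
      have heq : PySem.Str.slice s none (some (a.toList.length : Int)) = a := by
        apply String.ext
        rw [PySem.Str.toList_slice, PySem.Chars.slice_eq_listSlice,
          PySem.List.slice_to_natCast]
        exact (List.prefix_iff_eq_take.mp hpre).symm
      rw [heq]; exact ha

-- B's fold equals the core applied to the not-yet-blocked strings
theorem pvGoB_spec (l : List String) (kept : PySem.Set String) :
    pvGoB l kept = pvSpecCore (l.filter (fun s => !kept.any (fun a => pvTestA a s))) := by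
  induction l generalizing kept with
  | nil => simp [pvGoB, pvSpecCore_nil]
  | cons h t ih =>
    have hblock : pvBlockedB kept h = kept.any (fun a => pvTestA a h) := by
      rcases hb : pvBlockedB kept h with _ | _
      · symm
        rw [Bool.eq_false_iff] at hb ⊢
        intro hx
        rw [List.any_eq_true] at hx
        obtain ⟨a, ha, hta⟩ := hx
        exact hb ((pvBlockedB_iff kept h).mpr ⟨a, ha, (pvTestA_iff a h).mp hta⟩)
      · symm
        obtain ⟨a, ha, hpre⟩ := (pvBlockedB_iff kept h).mp hb
        rw [List.any_eq_true]
        exact ⟨a, ha, (pvTestA_iff a h).mpr hpre⟩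
    rw [pvGoB, hblock, List.filter_cons]
    rcases hb : kept.any (fun a => pvTestA a h) with _ | _
    · -- not blocked: h is kept
      simp only [Bool.false_eq_true, if_false, Bool.not_false, if_true]
      rw [pvSpecCore_cons, ih (kept.add h), List.filter_filter]
      congr 2
      apply List.filter_congr
      intro s _
      have hadd : (kept.add h).any (fun a => pvTestA a s)
          = (kept.any (fun a => pvTestA a s) || pvTestA h s) := by
        rcases hx : (kept.add h).any (fun a => pvTestA a s) with _ | _
        · symm
          rw [Bool.eq_false_iff] at hx ⊢
          intro hy
          apply hx
          rw [List.any_eq_true]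
          rw [Bool.or_eq_true, List.any_eq_true] at hy
          rcases hy with ⟨a, ha, hta⟩ | hth
          · exact ⟨a, (PySem.Set.mem_add kept h a).mpr (Or.inl ha), hta⟩
          · exact ⟨h, (PySem.Set.mem_add kept h h).mpr (Or.inr rfl), hth⟩
        · symm
          rw [List.any_eq_true] at hx
          obtain ⟨a, ha, hta⟩ := hx
          rw [PySem.Set.mem_add] at ha
          rw [Bool.or_eq_true, List.any_eq_true]
          rcases ha with ha | rfl
          · exact Or.inl ⟨a, ha, hta⟩
          · exact Or.inr hta
      rw [hadd]
      cases kept.any (fun a => pvTestA a s) <;> cases pvTestA h s <;> simp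
    · -- blocked: h dropped
      simp only [Bool.not_true, Bool.false_eq_true, if_false, if_true]
      exact ih kept

-- ===== VERDICT (by name: the statement is the Claim_ definition above) =====
theorem list_merge_path_spec : Claim_equal_list_merge_path := by
  intro list _
  unfold Spec_list_merge_path list_merge_path list_merge_path_alt
  rw [pvOuterA_spec _ _ _ (by omega), pvGoB_spec]
  simp [PySem.Set.empty]
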